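-- pv_equiv track=rewrite | github.com/Dimitri-Kfoury/AlgoExpertQuestions | Dynamic Programming/Max_increasing_Subsequence.py | reconstruct_sequence
-- ===== SOURCE A (Python) =====
-- def reconstruct_sequence(sequence,array,max_idx):
--     current_idx = max_idx
--     resulting_sequence = []
--     while current_idx != sequence[current_idx]:
--         resulting_sequence.append(array[current_idx])
--         current_idx = sequence[current_idx]
--     resulting_sequence.append(array[current_idx])
--     return list(reversed(resulting_sequence))
-- ===== SOURCE B (Python) =====
-- def reconstruct_sequence(sequence, array, max_idx):
--     # Phase 1: recursively collect the index chain from max_idx to its fixed point.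
--     def chain(idx):
--         nxt = sequence[idx]
--         if nxt == idx:
--             return [idx]
--         return [idx] + chain(nxt)
--     # Phase 2: map the array over the reversed chain.
--     return [array[i] for i in reversed(chain(max_idx))]
-- ===== Notes on version B (the rewrite author's own statement) =====
-- stated objective: alternative
-- what changed: Replaces A's single while-loop that accumulates values and reverses at the end by a two-phase decomposition: a recursion that first collects the chain of indices, then a separate map of the array over the reversed index chain.
import Mathlib
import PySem

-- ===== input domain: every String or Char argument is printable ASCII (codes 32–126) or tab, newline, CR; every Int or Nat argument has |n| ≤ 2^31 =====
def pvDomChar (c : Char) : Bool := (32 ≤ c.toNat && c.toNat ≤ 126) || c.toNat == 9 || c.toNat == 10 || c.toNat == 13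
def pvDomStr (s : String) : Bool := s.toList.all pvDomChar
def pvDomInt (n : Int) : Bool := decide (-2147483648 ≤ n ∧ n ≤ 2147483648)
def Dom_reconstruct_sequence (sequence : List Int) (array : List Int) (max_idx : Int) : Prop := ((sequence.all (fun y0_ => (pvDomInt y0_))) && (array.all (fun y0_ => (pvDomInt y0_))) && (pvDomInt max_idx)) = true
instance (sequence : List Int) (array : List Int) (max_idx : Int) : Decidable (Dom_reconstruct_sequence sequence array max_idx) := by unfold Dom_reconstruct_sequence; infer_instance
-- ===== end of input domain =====

-- B replaces A's while-loop + accumulator + final reversal by a two-phase decomposition: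
-- first recursively collect the chain of indices, then map the array over the reversed chain
-- (objective: alternative; same pointer chain, staged passes instead of one fused loop).


-- ===== PORT A =====
-- A's while-loop, as fuel recursion over the pointer chain (fuel = 2*len+1 suffices on Pre_;
-- the fuel-0 / index-out-of-range fallbacks are unreachable under Pre_).
def reconstruct_sequence_loop (sequence : List Int) (array : List Int) :
    Nat → Int → List Int → List Int
  | 0, _, acc => acc.reverse
  | fuel + 1, idx, acc =>
    match PySem.List.pyGet? sequence idx with
    | none => acc.reverse
    | some s =>
      if idx ≠ s then
        reconstruct_sequence_loop sequence array fuel s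
          (acc ++ [(PySem.List.pyGet? array idx).getD 0])
      else
        (acc ++ [(PySem.List.pyGet? array idx).getD 0]).reverse

def reconstruct_sequence (sequence : List Int) (array : List Int) (max_idx : Int) : List Int :=
  reconstruct_sequence_loop sequence array (2 * sequence.length + 1) max_idx []

-- ===== PORT B =====
-- Phase 1 of B: the chain of indices, by fuel recursion (fallbacks unreachable under Pre_).
def pvChain (sequence : List Int) : Nat → Int → List Int
  | 0, _ => []
  | fuel + 1, idx =>
    match PySem.List.pyGet? sequence idx with
    | none => []
    | some nxt =>
      if nxt = idx then [idx] else idx :: pvChain sequence fuel nxt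

-- Phase 2 of B: map the array over the reversed chain.
def reconstruct_sequence_alt (sequence : List Int) (array : List Int) (max_idx : Int) : List Int :=
  ((pvChain sequence (2 * sequence.length + 1) max_idx).reverse).map
    (fun i => (PySem.List.pyGet? array i).getD 0)

-- ===== PRECONDITION & SPEC =====
-- pvWalk seq i k = the k-th iterate of the predecessor-pointer map starting at i (none once an index error occurs)
def pvWalk (seq : List Int) (i : Int) (k : Nat) : Option Int :=
  (fun o => o.bind (PySem.List.pyGet? seq))^[k] (some i)

-- Pre_: exactly the inputs on which Python A returns — the pointer walk from max_idx reaches a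
-- fixed point (necessarily within 2*len steps: only 2*len indices are valid, so a longer walk
-- cycles and A diverges) and every visited index is a valid Python index into array.
def Pre_reconstruct_sequence (sequence : List Int) (array : List Int) (max_idx : Int) : Prop :=
  ∃ k ∈ List.range (2 * sequence.length + 1),
    ((pvWalk sequence max_idx k).elim false
      (fun i => PySem.List.pyGet? sequence i == some i)) = true ∧
    ∀ m ∈ List.range (k + 1),
      ((pvWalk sequence max_idx m).elim false
        (fun j => decide (PySem.Raise.InRange array.length j))) = true

instance (sequence : List Int) (array : List Int) (max_idx : Int) :
    Decidable (Pre_reconstruct_sequence sequence array max_idx) := by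
  unfold Pre_reconstruct_sequence; infer_instance

def pvWitness_reconstruct_sequence : List Int × List Int × Int := ([0, 0, 1], [5, 7, 9], 2)

def Spec_reconstruct_sequence (sequence : List Int) (array : List Int) (max_idx : Int) (out : List Int) : Prop := out = reconstruct_sequence_alt sequence array max_idx
instance (sequence : List Int) (array : List Int) (max_idx : Int) (out : List Int) : Decidable (Spec_reconstruct_sequence sequence array max_idx out) := by unfold Spec_reconstruct_sequence; infer_instance

-- ===== CLAIM (what is proved, stated in full; the proofs are below) =====
def Claim_equal_reconstruct_sequence : Prop := ∀ (sequence : List Int) (array : List Int) (max_idx : Int), Dom_reconstruct_sequence sequence array max_idx → Pre_reconstruct_sequence sequence array max_idx → Spec_reconstruct_sequence sequence array max_idx (reconstruct_sequence sequence array max_idx)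

-- ===== LEMMAS AND PROOFS =====
-- A's loop with accumulator acc equals the mapped, reversed chain followed by acc reversed;
-- this holds for every fuel, index and accumulator, including the unreachable fallback branches.
theorem loop_eq_chain_append (sequence array : List Int) :
    ∀ (fuel : Nat) (idx : Int) (acc : List Int),
      reconstruct_sequence_loop sequence array fuel idx acc =
        ((pvChain sequence fuel idx).reverse).map
          (fun i => (PySem.List.pyGet? array i).getD 0) ++ acc.reverse := by
  intro fuel
  induction fuel with
  | zero => intro idx acc; simp [reconstruct_sequence_loop, pvChain]
  | succ f ih =>
    intro idx acc
    simp only [reconstruct_sequence_loop, pvChain]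
    cases h : PySem.List.pyGet? sequence idx with
    | none => simp
    | some s =>
      by_cases hs : s = idx
      · simp [hs]
      · simp [hs, Ne.symm hs, ih]

-- ===== VERDICT (by name: the statement is the Claim_ definition above) =====
theorem reconstruct_sequence_spec : Claim_equal_reconstruct_sequence := by
  intro sequence array max_idx _ _
  unfold Spec_reconstruct_sequence reconstruct_sequence reconstruct_sequence_alt
  simp [loop_eq_chain_append]
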